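-- pv_equiv track=rewrite | github.com/ParserGen/ParGen | framework/b_tree/fix_agent/step2_fix.py | _split_top_level_disjunctions
-- ===== SOURCE A (Python) =====
-- from typing import Sequence, Dict, Any, List, Tuple, Optional, Set
--
-- def _split_top_level_disjunctions(expr: str) -> List[str]:
--     clauses: List[str] = []
--     if not expr:
--         return clauses
--     depth = 0
--     start = 0
--     i = 0
--     length = len(expr)
--     while i < length:
--         ch = expr[i]
--         if ch == '(':
--             depth += 1
--         elif ch == ')':
--             if depth > 0:
--                 depth -= 1
--         elif depth == 0 and expr[i:i + 4].lower() == ' or ':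
--             clause = expr[start:i].strip()
--             if clause:
--                 clauses.append(clause)
--             start = i + 4
--             i += 3
--         i += 1
--     tail = expr[start:].strip()
--     if tail:
--         clauses.append(tail)
--     return clauses
-- ===== SOURCE B (Python) =====
-- def _split_top_level_disjunctions(expr: str):
--     # Pass 1: prefix table of clamped paren depth; depths[i] = depth before index i.
--     depths = [0] * (len(expr) + 1)
--     d = 0
--     for i, ch in enumerate(expr):
--         if ch == '(':
--             d += 1
--         elif ch == ')' and d > 0:
--             d -= 1
--         depths[i + 1] = d
--     # Pass 2: split at every candidate ' or ' whose depth is 0 and which does not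
--     # overlap an already-consumed separator.
--     low = expr.lower()
--     clauses = []
--     start = 0
--     for p in range(len(expr) - 3):
--         if p >= start and depths[p] == 0 and low[p:p + 4] == ' or ':
--             clause = expr[start:p].strip()
--             if clause:
--                 clauses.append(clause)
--             start = p + 4
--     tail = expr[start:].strip()
--     if tail:
--         clauses.append(tail)
--     return clauses
-- ===== Notes on version B (the rewrite author's own statement) =====
-- stated objective: alternative
-- what changed: A's single fused scan (tracking depth, start and clauses while stepping an index with +4/+1 jumps) is replaced by a two-pass decomposition: one pass builds a prefix table of clamped paren depths and a lowercased copy, then a plain left-to-right pass over all candidate positions keeps each case-insensitive space-or-space separator whose table depth is 0 and which does not overlap the previously consumed separator, slicing clauses between kept separators.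
import Mathlib
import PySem

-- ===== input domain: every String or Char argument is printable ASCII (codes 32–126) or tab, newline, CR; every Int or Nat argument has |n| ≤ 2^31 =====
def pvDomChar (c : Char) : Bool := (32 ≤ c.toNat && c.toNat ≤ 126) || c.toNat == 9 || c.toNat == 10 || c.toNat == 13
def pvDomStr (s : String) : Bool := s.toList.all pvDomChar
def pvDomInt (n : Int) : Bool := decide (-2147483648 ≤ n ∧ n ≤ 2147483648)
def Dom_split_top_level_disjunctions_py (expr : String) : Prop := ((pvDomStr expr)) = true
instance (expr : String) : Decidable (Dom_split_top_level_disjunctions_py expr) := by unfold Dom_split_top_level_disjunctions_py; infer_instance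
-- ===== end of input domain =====

-- B replaces A's fused scan by a prefix table of clamped paren depths plus a filtered
-- range pass over a lowercased copy (objective: alternative decomposition, same cost).


-- the literal ' or ' both Pythons compare against
def pvPat : List Char := [' ', 'o', 'r', ' ']

-- ===== PORT A =====
-- transliteration of A's while-loop: i, depth, start, clauses exactly as in the Python
def pvLoopA (cs : List Char) (i depth start : Nat) (clauses : List String) : List String :=
  if h : i < cs.length then
    let ch := cs[i]
    if ch = '(' then
      pvLoopA cs (i + 1) (depth + 1) start clauses
    else if ch = ')' then
      pvLoopA cs (i + 1) (if 0 < depth then depth - 1 else depth) start clauses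
    else if depth = 0 ∧
        PySem.Chars.lower (PySem.List.slice cs (some (i : Int)) (some ((i : Int) + 4))) = pvPat then
      -- clause = expr[start:i].strip(); append if nonempty; start = i+4; i += 3; i += 1
      let clause := PySem.Chars.strip (PySem.List.slice cs (some (start : Int)) (some (i : Int)))
      pvLoopA cs (i + 4) depth (i + 4)
        (if clause ≠ [] then clauses ++ [String.ofList clause] else clauses)
    else
      pvLoopA cs (i + 1) depth start clauses
  else
    let tail := PySem.Chars.strip (PySem.List.slice cs (some (start : Int)) none)
    if tail ≠ [] then clauses ++ [String.ofList tail] else clauses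
termination_by cs.length - i
decreasing_by all_goals omega

def split_top_level_disjunctions_py (expr : String) : List String :=
  let cs := expr.toList
  if cs.isEmpty then [] else pvLoopA cs 0 0 0 []

-- ===== PORT B =====
-- body of Source B's first for-loop: grow the depth table, clamping ')' at depth 0
def pvDepthStepB (acc : List Nat × Nat) (ch : Char) : List Nat × Nat :=
  let d := if ch = '(' then acc.2 + 1
           else if ch = ')' ∧ 0 < acc.2 then acc.2 - 1 else acc.2
  (acc.1 ++ [d], d)

-- pass 1 of Source B: depths[k] = clamped paren depth before index k (depths[0] = 0)
def pvDepthsB (cs : List Char) : List Nat := (cs.foldl pvDepthStepB ([0], 0)).1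

-- body of Source B's second for-loop; state = (clauses, start); depths[p] is always in range
def pvStepB (cs low : List Char) (depths : List Nat) (st : List String × Int) (p : Int) :
    List String × Int :=
  if st.2 ≤ p ∧ PySem.List.pyGetD depths p 0 = 0 ∧
      PySem.List.slice low (some p) (some (p + 4)) = pvPat then
    let clause := PySem.Chars.strip (PySem.List.slice cs (some st.2) (some p))
    (if clause ≠ [] then st.1 ++ [String.ofList clause] else st.1, p + 4)
  else st

def split_top_level_disjunctions_py_alt (expr : String) : List String :=
  let cs := expr.toList
  let low := PySem.Chars.lower cs
  let depths := pvDepthsB cs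
  let st := (PySem.List.pyRange 0 ((cs.length : Int) - 3) 1).foldl (pvStepB cs low depths) ([], 0)
  let tail := PySem.Chars.strip (PySem.List.slice cs (some st.2) none)
  if tail ≠ [] then st.1 ++ [String.ofList tail] else st.1

-- ===== PRECONDITION & SPEC =====
def Spec_split_top_level_disjunctions_py (expr : String) (out : List String) : Prop := out = split_top_level_disjunctions_py_alt expr
instance (expr : String) (out : List String) : Decidable (Spec_split_top_level_disjunctions_py expr out) := by unfold Spec_split_top_level_disjunctions_py; infer_instance

-- ===== CLAIM (what is proved, stated in full; the proofs are below) =====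
def Claim_equal_split_top_level_disjunctions_py : Prop := ∀ (expr : String), Dom_split_top_level_disjunctions_py expr → Spec_split_top_level_disjunctions_py expr (split_top_level_disjunctions_py expr)

-- ===== LEMMAS AND PROOFS =====

-- A's running depth as a function of the position: fold of one step over the prefix
def pvDStep (d : Nat) (c : Char) : Nat :=
  if c = '(' then d + 1 else if c = ')' then (if 0 < d then d - 1 else d) else d

def pvDAt (cs : List Char) (i : Nat) : Nat := (cs.take i).foldl pvDStep 0

-- B's finishing lines, as a function of the fold state
def pvFinish (cs : List Char) (st : List String × Int) : List String :=
  let tail := PySem.Chars.strip (PySem.List.slice cs (some st.2) none)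
  if tail ≠ [] then st.1 ++ [String.ofList tail] else st.1

-- the tail of B's loop range, as a list of Int positions
def pvRng (cs : List Char) (i : Nat) : List Int :=
  (List.range' i (cs.length - 3 - i)).map (fun k => (k : Int))

lemma pvRng_cons (cs : List Char) (j : Nat) (h : j < cs.length - 3) :
    pvRng cs j = (j : Int) :: pvRng cs (j + 1) := by
  unfold pvRng
  have : cs.length - 3 - j = (cs.length - 3 - (j + 1)) + 1 := by omega
  rw [this, List.range'_succ]
  simp

lemma pvRng_nil (cs : List Char) (j : Nat) (h : cs.length - 3 ≤ j) : pvRng cs j = [] := by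
  unfold pvRng
  have : cs.length - 3 - j = 0 := by omega
  rw [this]
  simp

lemma pvDAt_succ (cs : List Char) (i : Nat) (h : i < cs.length) :
    pvDAt cs (i + 1) = pvDStep (pvDAt cs i) cs[i] := by
  unfold pvDAt
  rw [List.take_add_one, List.getElem?_eq_getElem h, Option.toList_some, List.foldl_append,
    List.foldl_cons, List.foldl_nil]

lemma pvDepthStepB_eq (a : List Nat × Nat) (c : Char) :
    pvDepthStepB a c = (a.1 ++ [pvDStep a.2 c], pvDStep a.2 c) := by
  unfold pvDepthStepB pvDStep
  by_cases h1 : c = '(' <;> by_cases h2 : c = ')' <;> by_cases h3 : 0 < a.2 <;>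
    simp [h1, h2, h3]

lemma pvDepthsB_aux (cs : List Char) :
    cs.foldl pvDepthStepB ([0], 0)
      = ((List.range (cs.length + 1)).map (pvDAt cs), pvDAt cs cs.length) := by
  induction cs using List.reverseRecOn with
  | nil => simp [pvDAt]
  | append_singleton cs c ih =>
    rw [List.foldl_append, ih, List.foldl_cons, List.foldl_nil, pvDepthStepB_eq]
    dsimp only
    rw [Prod.mk.injEq]
    have hkeep : ∀ i, i ≤ cs.length → pvDAt (cs ++ [c]) i = pvDAt cs i := by
      intro i hi
      unfold pvDAt
      rw [List.take_append_of_le_length hi]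
    have hlast : pvDAt (cs ++ [c]) (cs.length + 1) = pvDStep (pvDAt cs cs.length) c := by
      rw [pvDAt_succ (cs ++ [c]) cs.length (by simp), hkeep cs.length le_rfl]
      congr 1
      simp
    constructor
    · have hL : (cs ++ [c]).length + 1 = (cs.length + 1) + 1 := by simp
      rw [hL]
      conv_rhs => rw [List.range_succ, List.map_append]
      congr 1
      · apply List.map_congr_left
        intro k hk
        have hk' := List.mem_range.mp hk
        exact (hkeep k (by omega)).symm
      · simpa using hlast.symm
    · simpa using hlast.symm

lemma pvDepthsB_getD (cs : List Char) (p : Nat) (hp : p ≤ cs.length) :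
    PySem.List.pyGetD (pvDepthsB cs) (p : Int) 0 = pvDAt cs p := by
  rw [PySem.List.pyGetD_natCast]
  unfold pvDepthsB
  rw [pvDepthsB_aux]
  rw [List.getD_eq_getElem?_getD, List.getElem?_map, List.getElem?_range (by omega)]
  simp

-- a char whose lowercase is in the pattern is not a parenthesis, so it keeps the depth
lemma pvDStep_of_lower_mem (d : Nat) (c : Char) (hc : PySem.Chars.lowerChar c ∈ pvPat) :
    pvDStep d c = d := by
  have h1 : c ≠ '(' := by rintro rfl; revert hc; decide
  have h2 : c ≠ ')' := by rintro rfl; revert hc; decide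
  simp [pvDStep, h1, h2]

-- skipping: positions below the current start are rejected by the p >= start guard
lemma pvSkip (cs low : List Char) (depths : List Nat) (k : Nat) :
    ∀ (j : Nat) (cl : List String),
    (pvRng cs j).foldl (pvStepB cs low depths) (cl, ((j + k : Nat) : Int))
      = (pvRng cs (j + k)).foldl (pvStepB cs low depths) (cl, ((j + k : Nat) : Int)) := by
  induction k with
  | zero => intro j cl; rfl
  | succ k ih =>
    intro j cl
    by_cases hj : j < cs.length - 3
    · rw [pvRng_cons cs j hj, List.foldl_cons]
      have hguard : ¬ (((j + (k + 1) : Nat) : Int) ≤ (j : Int)) := by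
        push_cast; omega
      rw [show pvStepB cs low depths (cl, ((j + (k + 1) : Nat) : Int)) (j : Int)
            = (cl, ((j + (k + 1) : Nat) : Int)) by
        unfold pvStepB
        rw [if_neg]
        rintro ⟨h1, -⟩
        exact hguard h1]
      have harith : j + (k + 1) = (j + 1) + k := by omega
      rw [harith]
      exact ih (j + 1) cl
    · rw [pvRng_nil cs j (by omega), pvRng_nil cs (j + (k + 1)) (by omega)]

lemma pvBase (cs : List Char) (i start : Nat) (clauses : List String)
    (hi : ¬ i < cs.length) :
    pvLoopA cs i (pvDAt cs i) start clauses
      = pvFinish cs ((pvRng cs i).foldl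
          (pvStepB cs (PySem.Chars.lower cs) (pvDepthsB cs)) (clauses, (start : Int))) := by
  rw [pvLoopA, dif_neg hi, pvRng_nil cs i (by omega), List.foldl_nil]
  rfl

lemma pvLower_eq_map (cs : List Char) :
    PySem.Chars.lower cs = cs.map PySem.Chars.lowerChar := by
  simp [PySem.Chars.lower]

lemma pvSlice4 (xs : List Char) (i : Nat) :
    PySem.List.slice xs (some (i : Int)) (some ((i : Int) + 4)) = (xs.drop i).take 4 := by
  have h4 : ((i : Int) + 4) = ((i : Int) + ((4 : Nat) : Int)) := by push_cast; ring
  rw [h4, PySem.List.slice_natCast_add]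

lemma pvMain (cs : List Char) (n : Nat) :
    ∀ i start clauses, cs.length - i ≤ n → start ≤ i →
    pvLoopA cs i (pvDAt cs i) start clauses
      = pvFinish cs ((pvRng cs i).foldl
          (pvStepB cs (PySem.Chars.lower cs) (pvDepthsB cs)) (clauses, (start : Int))) := by
  induction n with
  | zero =>
    intro i start clauses hn hs
    exact pvBase cs i start clauses (by omega)
  | succ n ih =>
    intro i start clauses hn hs
    by_cases hi : i < cs.length
    case neg => exact pvBase cs i start clauses hi
    case pos =>
    set low := PySem.Chars.lower cs with hlowdef
    have hlow : low = cs.map PySem.Chars.lowerChar := pvLower_eq_map cs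
    have hlen : low.length = cs.length := by rw [hlow]; simp
    -- A's window condition, rewritten through the global lowercase copy
    have hwinA : PySem.Chars.lower (PySem.List.slice cs (some (i : Int)) (some ((i : Int) + 4)))
        = (low.drop i).take 4 := by
      rw [pvSlice4, pvLower_eq_map, hlow, List.map_take, List.map_drop]
    by_cases hm : (low.drop i).take 4 = pvPat
    · -- a textual candidate at i
      have h4 : i + 4 ≤ cs.length := by
        have := congrArg List.length hm
        simp [pvPat, List.length_take, List.length_drop, hlen] at this
        omega
      have hget? : ∀ k, k < 4 → (cs[i + k]?).map PySem.Chars.lowerChar = pvPat[k]? := by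
        intro k hk
        have h1 : ((low.drop i).take 4)[k]? = pvPat[k]? := by rw [hm]
        rw [List.getElem?_take_of_lt hk, List.getElem?_drop, hlow, List.getElem?_map] at h1
        exact h1
      have hlowc : ∀ k, (hk : k < 4) → PySem.Chars.lowerChar (cs[i + k]'(by omega)) ∈ pvPat := by
        intro k hk
        have h1 := hget? k hk
        rw [List.getElem?_eq_getElem (show i + k < cs.length by omega), Option.map_some] at h1
        exact List.mem_of_getElem? h1.symm
      have hsp : PySem.Chars.lowerChar cs[i] = ' ' := by
        have h1 := hget? 0 (by omega)
        rw [show i + 0 = i from rfl, List.getElem?_eq_getElem hi, Option.map_some] at h1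
        simpa [pvPat] using h1
      have hne1 : cs[i] ≠ '(' := by
        intro hc; rw [hc] at hsp; exact absurd hsp (by decide)
      have hne2 : cs[i] ≠ ')' := by
        intro hc; rw [hc] at hsp; exact absurd hsp (by decide)
      have hiL : i < cs.length - 3 := by omega
      have hDat4 : pvDAt cs (i + 4) = pvDAt cs i := by
        have e1 := pvDAt_succ cs i (by omega)
        have e2 := pvDAt_succ cs (i + 1) (by omega)
        have e3 := pvDAt_succ cs (i + 2) (by omega)
        have e4 := pvDAt_succ cs (i + 3) (by omega)
        have s1 := pvDStep_of_lower_mem (pvDAt cs i) cs[i] (by simpa using hlowc 0 (by omega))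
        have s2 := pvDStep_of_lower_mem (pvDAt cs (i + 1)) (cs[i + 1]'(by omega))
          (hlowc 1 (by omega))
        have s3 := pvDStep_of_lower_mem (pvDAt cs (i + 2)) (cs[i + 2]'(by omega))
          (hlowc 2 (by omega))
        have s4 := pvDStep_of_lower_mem (pvDAt cs (i + 3)) (cs[i + 3]'(by omega))
          (hlowc 3 (by omega))
        calc pvDAt cs (i + 4) = pvDAt cs (i + 3 + 1) := by ring_nf
          _ = pvDAt cs (i + 3) := by rw [e4, s4]
          _ = pvDAt cs (i + 2) := by rw [show i + 3 = i + 2 + 1 by omega, e3, s3]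
          _ = pvDAt cs (i + 1) := by rw [show i + 2 = i + 1 + 1 by omega, e2, s2]
          _ = pvDAt cs i := by rw [e1, s1]
      have hD1 : pvDAt cs (i + 1) = pvDAt cs i := by
        rw [pvDAt_succ cs i hi,
          pvDStep_of_lower_mem (pvDAt cs i) cs[i] (by simpa using hlowc 0 (by omega))]
      have hdepths : PySem.List.pyGetD (pvDepthsB cs) (i : Int) 0 = pvDAt cs i :=
        pvDepthsB_getD cs i (by omega)
      by_cases hd : pvDAt cs i = 0
      · -- kept separator
        rw [pvLoopA, dif_pos hi, if_neg hne1, if_neg hne2, if_pos ⟨hd, by rw [hwinA]; exact hm⟩]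
        rw [pvRng_cons cs i hiL, List.foldl_cons]
        have hstepEq : pvStepB cs low (pvDepthsB cs) (clauses, (start : Int)) (i : Int)
            = ((if PySem.Chars.strip (PySem.List.slice cs (some (start : Int)) (some (i : Int)))
                   ≠ [] then
                 clauses ++ [String.ofList (PySem.Chars.strip
                   (PySem.List.slice cs (some (start : Int)) (some (i : Int))))]
               else clauses), ((i + 4 : Nat) : Int)) := by
          unfold pvStepB
          rw [if_pos ⟨show (start : Int) ≤ (i : Int) by exact_mod_cast hs,
            by rw [hdepths]; exact hd, by rw [pvSlice4]; exact hm⟩]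
          have hc : ((i : Int) + 4) = ((i + 4 : Nat) : Int) := by push_cast; ring
          rw [hc]
        rw [hstepEq]
        set clauses' := (if PySem.Chars.strip (PySem.List.slice cs (some (start : Int))
            (some (i : Int))) ≠ [] then
          clauses ++ [String.ofList (PySem.Chars.strip
            (PySem.List.slice cs (some (start : Int)) (some (i : Int))))] else clauses)
        have hskip := pvSkip cs low (pvDepthsB cs) 3 (i + 1) clauses'
        rw [show (i + 1) + 3 = i + 4 by omega] at hskip
        rw [hskip]
        have := ih (i + 4) (i + 4) clauses' (by omega) le_rfl
        rw [hDat4] at this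
        exact this
      · -- depth > 0: candidate rejected by both
        rw [pvLoopA, dif_pos hi, if_neg hne1, if_neg hne2, if_neg (by rintro ⟨h0, -⟩; exact hd h0)]
        rw [pvRng_cons cs i hiL, List.foldl_cons]
        rw [show pvStepB cs low (pvDepthsB cs) (clauses, (start : Int)) (i : Int)
              = (clauses, (start : Int)) by
          unfold pvStepB
          rw [if_neg]
          rintro ⟨-, hdep, -⟩
          rw [hdepths] at hdep
          exact hd hdep]
        have := ih (i + 1) start clauses (by omega) (by omega)
        rw [hD1] at this
        exact this
    · -- no textual candidate at i: A advances by one, B's guard (if reached) rejects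
      have hBside : (pvRng cs i).foldl (pvStepB cs low (pvDepthsB cs)) (clauses, (start : Int))
          = (pvRng cs (i + 1)).foldl (pvStepB cs low (pvDepthsB cs)) (clauses, (start : Int)) := by
        by_cases hiL : i < cs.length - 3
        · rw [pvRng_cons cs i hiL, List.foldl_cons]
          rw [show pvStepB cs low (pvDepthsB cs) (clauses, (start : Int)) (i : Int)
                = (clauses, (start : Int)) by
            unfold pvStepB
            rw [if_neg]
            rintro ⟨-, -, hsl⟩
            rw [pvSlice4] at hsl
            exact hm hsl]
        · rw [pvRng_nil cs i (by omega), pvRng_nil cs (i + 1) (by omega)]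
      rw [hBside]
      have ih1 := ih (i + 1) start clauses (by omega) (by omega)
      by_cases hc1 : cs[i] = '('
      · rw [pvLoopA, dif_pos hi, if_pos hc1]
        have : pvDAt cs (i + 1) = pvDAt cs i + 1 := by
          rw [pvDAt_succ cs i hi, hc1]; simp [pvDStep]
        rw [this] at ih1
        exact ih1
      · by_cases hc2 : cs[i] = ')'
        · rw [pvLoopA, dif_pos hi, if_neg hc1, if_pos hc2]
          have : pvDAt cs (i + 1)
              = (if 0 < pvDAt cs i then pvDAt cs i - 1 else pvDAt cs i) := by
            rw [pvDAt_succ cs i hi, hc2]; simp [pvDStep]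
          rw [this] at ih1
          exact ih1
        · rw [pvLoopA, dif_pos hi, if_neg hc1, if_neg hc2,
            if_neg (by rintro ⟨-, hw⟩; rw [hwinA] at hw; exact hm hw)]
          have : pvDAt cs (i + 1) = pvDAt cs i := by
            rw [pvDAt_succ cs i hi]; simp [pvDStep, hc1, hc2]
          rw [this] at ih1
          exact ih1

lemma pvRange_eq (cs : List Char) :
    PySem.List.pyRange 0 ((cs.length : Int) - 3) 1 = pvRng cs 0 := by
  by_cases h3 : 3 ≤ cs.length
  · have : ((cs.length : Int) - 3) = ((cs.length - 3 : Nat) : Int) := by push_cast [h3]; ring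
    rw [this, PySem.List.pyRange_zero_natCast]
    unfold pvRng
    rw [Nat.sub_zero, ← List.range_eq_range']
    simp
    exact List.map_eq_flatMap
  · have hneg : ((cs.length : Int) - 3) ≤ 0 := by omega
    rw [pvRng_nil cs 0 (by omega)]
    simp only [PySem.List.pyRange]
    norm_num
    intro h2
    omega

-- ===== VERDICT (by name: the statement is the Claim_ definition above) =====
theorem split_top_level_disjunctions_py_spec : Claim_equal_split_top_level_disjunctions_py := by
  unfold Claim_equal_split_top_level_disjunctions_py
  intro expr _
  unfold Spec_split_top_level_disjunctions_py
  unfold split_top_level_disjunctions_py split_top_level_disjunctions_py_alt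
  simp only
  by_cases hcs : expr.toList.isEmpty
  · rw [if_pos hcs]
    rw [List.isEmpty_iff] at hcs
    rw [hcs]
    decide
  · rw [if_neg hcs]
    have h := pvMain expr.toList expr.toList.length 0 0 [] (by omega) le_rfl
    rw [show pvDAt expr.toList 0 = 0 from rfl] at h
    simp only [Nat.cast_zero] at h
    rw [h, pvFinish, ← pvRange_eq]
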